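-- pv_equiv track=rewrite | github.com/marekpola/biblens-data-tools | src/build_recognition_languages.py | order_books
-- ===== SOURCE A (Python) =====
-- BOOK_ORDER = [
--     "GEN","EXO","LEV","NUM","DEU",
--     "JOS","JDG","RUT",
--     "1SA","2SA","1KI","2KI","1CH","2CH",
--     "EZR","NEH","EST","JOB","PSA","PRO","ECC","SNG",
--     "ISA","JER","LAM","EZK","DAN",
--     "HOS","JOL","AMO","OBA","JON","MIC","NAM","HAB","ZEP","HAG","ZEC","MAL",
--     "MAT","MRK","LUK","JHN","ACT",
--     "ROM","1CO","2CO","GAL","EPH","PHP","COL",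
--     "1TH","2TH","1TI","2TI","TIT","PHM",
--     "HEB","JAS","1PE","2PE","1JN","2JN","3JN","JUD","REV",
--     "TOB","JDT","ESG","WIS","SIR","BAR","LJE","S3Y","SUS","BEL",
--     "1MA","2MA","3MA","4MA",
--     "1ES","2ES",
--     "MAN","PS2","ODA","PSS",
--     "EZA","5EZ","6EZ",
--     "DAG","PS3",
--     "2BA","LBA",
--     "JUB","ENO",
--     "1MQ","2MQ","3MQ",
--     "REP","4BA",
--     "LAO",
-- ]
--
-- def order_books(books: dict) -> dict:
--     ordered = {}
--
--     for book_id in BOOK_ORDER: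
--         if book_id in books:
--             ordered[book_id] = books[book_id]
--
--     # případné neznámé knihy na konec
--     for book_id in books:
--         if book_id not in ordered:
--             ordered[book_id] = books[book_id]
--
--     return ordered
-- ===== SOURCE B (Python) =====
-- _CANON = (
--     "GEN EXO LEV NUM DEU JOS JDG RUT 1SA 2SA 1KI 2KI 1CH 2CH EZR NEH EST "
--     "JOB PSA PRO ECC SNG ISA JER LAM EZK DAN HOS JOL AMO OBA JON MIC NAM "
--     "HAB ZEP HAG ZEC MAL MAT MRK LUK JHN ACT ROM 1CO 2CO GAL EPH PHP COL "
--     "1TH 2TH 1TI 2TI TIT PHM HEB JAS 1PE 2PE 1JN 2JN 3JN JUD REV TOB JDT "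
--     "ESG WIS SIR BAR LJE S3Y SUS BEL 1MA 2MA 3MA 4MA 1ES 2ES MAN PS2 ODA "
--     "PSS EZA 5EZ 6EZ DAG PS3 2BA LBA JUB ENO 1MQ 2MQ 3MQ REP 4BA LAO"
-- ).split()
--
--
-- def order_books(books: dict) -> dict:
--     # Bucket distribution: one sweep over the dict, dropping each entry into
--     # the bucket of its canonical rank (unknown books share the sentinel last
--     # bucket, keeping insertion order), then the buckets are concatenated.
--     n = len(_CANON)
--     rank = {b: i for i, b in enumerate(_CANON)}
--     buckets = [[] for _ in range(n + 1)]
--     for k, v in books.items():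
--         buckets[rank.get(k, n)].append((k, v))
--     return dict(pair for bucket in buckets for pair in bucket)
-- ===== Notes on version B (the rewrite author's own statement) =====
-- stated objective: alternative
-- what changed: Replaces A's two filtering passes (a scan over BOOK_ORDER inserting known books, then a scan over the dict inserting the rest) with a bucket distribution: a precomputed rank index built from a split canonical string, one pass over the dict dropping each entry into the bucket of its canonical rank (unknown books share a sentinel last bucket), then a dict built from the concatenated buckets.
import Mathlib
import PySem

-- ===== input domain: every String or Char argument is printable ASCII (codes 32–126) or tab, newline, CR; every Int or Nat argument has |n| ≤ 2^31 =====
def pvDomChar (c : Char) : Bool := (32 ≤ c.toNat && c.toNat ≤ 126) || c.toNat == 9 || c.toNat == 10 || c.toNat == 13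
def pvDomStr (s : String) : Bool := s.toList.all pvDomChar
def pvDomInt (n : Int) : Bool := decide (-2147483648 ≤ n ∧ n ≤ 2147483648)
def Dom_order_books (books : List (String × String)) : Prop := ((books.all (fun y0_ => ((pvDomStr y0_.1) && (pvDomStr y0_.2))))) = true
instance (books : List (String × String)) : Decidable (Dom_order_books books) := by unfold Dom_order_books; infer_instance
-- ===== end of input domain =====

-- B replaces A's two filtering passes by a one-pass bucket distribution over a precomputed rank index (objective: alternative).

-- ===== PORT A =====
def BOOK_ORDER : List String := ["GEN","EXO","LEV","NUM","DEU","JOS","JDG","RUT","1SA","2SA","1KI","2KI","1CH","2CH","EZR","NEH","EST","JOB","PSA","PRO","ECC","SNG","ISA","JER","LAM","EZK","DAN","HOS","JOL","AMO","OBA","JON","MIC","NAM","HAB","ZEP","HAG","ZEC","MAL","MAT","MRK","LUK","JHN","ACT","ROM","1CO","2CO","GAL","EPH","PHP","COL","1TH","2TH","1TI","2TI","TIT","PHM","HEB","JAS","1PE","2PE","1JN","2JN","3JN","JUD","REV","TOB","JDT","ESG","WIS","SIR","BAR","LJE","S3Y","SUS","BEL","1MA","2MA","3MA","4MA","1ES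","2ES","MAN","PS2","ODA","PSS","EZA","5EZ","6EZ","DAG","PS3","2BA","LBA","JUB","ENO","1MQ","2MQ","3MQ","REP","4BA","LAO"]

-- 'ordered = {}' then two loops; 'book_id in books' / 'books[book_id]' are dict membership/lookup,
-- written as a match on get? (the lookup is always guarded by membership in the Python).
def order_books (books : List (String × String)) : List (String × String) :=
  let bd : PySem.Dict String String := PySem.Dict.mk books
  let ordered : PySem.Dict String String :=
    BOOK_ORDER.foldl (fun d book_id =>
      match bd.get? book_id with
      | some v => d.insert book_id v
      | none => d) PySem.Dict.empty
  let ordered2 : PySem.Dict String String :=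
    bd.keys.foldl (fun d book_id =>
      if d.contains book_id then d
      else match bd.get? book_id with
        | some v => d.insert book_id v
        | none => d) ordered
  ordered2.items

-- ===== PORT B =====
-- _CANON = "GEN EXO … LAO".split(); rank = {b: i for i, b in enumerate(_CANON)};
-- buckets = [[] for _ in range(n+1)]; one pass appending each item to buckets[rank.get(k, n)];
-- dict(...) over the flattened buckets is PySem.Dict.ofList.
-- The bucket index rank.get(k, n) is always in [0, n], so List.set / List.getD are exact here.
def CANON : List String := PySem.Str.split₀ "GEN EXO LEV NUM DEU JOS JDG RUT 1SA 2SA 1KI 2KI 1CH 2CH EZR NEH EST JOB PSA PRO ECC SNG ISA JER LAM EZK DAN HOS JOL AMO OBA JON MIC NAM HAB ZEP HAG ZEC MAL MAT MRK LUK JHN ACT ROM 1CO 2CO GAL EPH PHP COL 1TH 2TH 1TI 2TI TIT PHM HEB JAS 1PE 2PE 1JN 2JN 3JN JUD REV TOB JDT ESG WIS SIR BAR LJE S3Y SUS BEL 1MA 2MA 3MA 4MA 1ES 2ES MAN PS2 ODA PSS EZA 5EZ 6EZ DAG PS3 2BA LBA JUB ENO 1MQ 2MQ 3MQ REP 4BA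 LAO"

def order_books_alt (books : List (String × String)) : List (String × String) :=
  let n : Int := (CANON.length : Int)
  let rank : PySem.Dict String Int :=
    (PySem.List.enumerate CANON).foldl (fun d p => d.insert p.2 p.1) PySem.Dict.empty
  let buckets0 : List (List (String × String)) := List.replicate (CANON.length + 1) []
  let buckets : List (List (String × String)) :=
    books.foldl (fun bs kv =>
      let i : Nat := (rank.getD kv.1 n).toNat
      bs.set i (bs.getD i [] ++ [kv])) buckets0
  (PySem.Dict.ofList buckets.flatten).items

-- ===== PRECONDITION & SPEC =====
-- Pre_ excludes association lists with duplicate keys: they do not represent a Python dict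
-- (dict construction collapses duplicates), so A's value on such a list is not defined by the Python.
def Pre_order_books (books : List (String × String)) : Prop := (books.map Prod.fst).Nodup
instance (books : List (String × String)) : Decidable (Pre_order_books books) := by unfold Pre_order_books; infer_instance
def pvWitness_order_books : (List (String × String)) := [("MAT", "Matthew"), ("GEN", "Genesis"), ("XYZ", "Unknown")]

def Spec_order_books (books : List (String × String)) (out : List (String × String)) : Prop := out = order_books_alt books
instance (books : List (String × String)) (out : List (String × String)) : Decidable (Spec_order_books books out) := by unfold Spec_order_books; infer_instance

-- ===== CLAIM (what is proved, stated in full; the proofs are below) =====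
def Claim_equal_order_books : Prop := ∀ (books : List (String × String)), Dom_order_books books → Pre_order_books books → Spec_order_books books (order_books books)

-- ===== LEMMAS AND PROOFS =====

set_option maxRecDepth 4000 in
theorem CANON_eq : CANON = BOOK_ORDER := by decide

-- rank function of B, named for the proofs
def pvRank (k : String) : Nat :=
  (((PySem.List.enumerate BOOK_ORDER).foldl (fun d p => d.insert p.2 p.1)
      PySem.Dict.empty).getD k (BOOK_ORDER.length : Int)).toNat

theorem book_order_nodup : BOOK_ORDER.Nodup := by decide

theorem rank_items :
    ((PySem.List.enumerate BOOK_ORDER).foldl (fun d p => d.insert p.2 p.1)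
      PySem.Dict.empty).items = (PySem.List.enumerate BOOK_ORDER).map (fun p => (p.2, p.1)) := by
  have h := PySem.Dict.items_foldl_insert_fresh (PySem.List.enumerate BOOK_ORDER)
    (fun p => p.2) (fun p => p.1) PySem.Dict.empty
    (fun a _ => PySem.Dict.contains_empty _)
    (by rw [PySem.List.map_snd_enumerate]; exact book_order_nodup)
  simpa using h

theorem rank_keys :
    ((PySem.List.enumerate BOOK_ORDER).foldl (fun d p => d.insert p.2 p.1)
      PySem.Dict.empty).keys = BOOK_ORDER := by
  show (((PySem.List.enumerate BOOK_ORDER).foldl (fun d p => d.insert p.2 p.1)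
      PySem.Dict.empty).items).map (fun p => p.1) = BOOK_ORDER
  rw [rank_items, List.map_map]
  exact PySem.List.map_snd_enumerate BOOK_ORDER 0

theorem rank_of_not_mem {k : String} (h : k ∉ BOOK_ORDER) : pvRank k = BOOK_ORDER.length := by
  unfold pvRank
  rw [PySem.Dict.getD_of_not_contains]
  · simp
  · rw [PySem.Dict.contains_eq_decide_mem_keys, rank_keys]
    simpa using h

theorem rank_of_getElem {j : Nat} (hj : j < BOOK_ORDER.length) : pvRank (BOOK_ORDER[j]) = j := by
  unfold pvRank
  have hmem : ((BOOK_ORDER[j] : String), (j : Int)) ∈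
      ((PySem.List.enumerate BOOK_ORDER).foldl (fun d p => d.insert p.2 p.1)
        PySem.Dict.empty).items := by
    rw [rank_items]
    exact List.mem_map.mpr ⟨((j : Int), BOOK_ORDER[j]),
      (PySem.List.mem_enumerate_iff _ _ _).mpr ⟨j, hj, by simp⟩, rfl⟩
  rw [PySem.Dict.getD_of_mem_items _ hmem (by rw [rank_keys]; exact book_order_nodup)]
  simp

theorem rank_lt (k : String) : pvRank k < BOOK_ORDER.length + 1 := by
  by_cases h : k ∈ BOOK_ORDER
  · obtain ⟨j, hj, rfl⟩ := List.mem_iff_getElem.mp h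
    rw [rank_of_getElem hj]; omega
  · rw [rank_of_not_mem h]; omega

theorem rank_eq_iff {k : String} {j : Nat} (hj : j < BOOK_ORDER.length) :
    pvRank k = j ↔ k = BOOK_ORDER[j] := by
  constructor
  · intro he
    by_cases h : k ∈ BOOK_ORDER
    · obtain ⟨i, hi, rfl⟩ := List.mem_iff_getElem.mp h
      rw [rank_of_getElem hi] at he; subst he; rfl
    · rw [rank_of_not_mem h] at he; omega
  · rintro rfl; exact rank_of_getElem hj

theorem rank_eq_len_iff {k : String} : pvRank k = BOOK_ORDER.length ↔ k ∉ BOOK_ORDER := by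
  constructor
  · intro he h
    obtain ⟨i, hi, rfl⟩ := List.mem_iff_getElem.mp h
    rw [rank_of_getElem hi] at he; omega
  · exact rank_of_not_mem

-- the first loop of A: items appended one per known book
theorem foldl_known_items (bd : PySem.Dict String String) :
    ∀ (ids : List String) (d : PySem.Dict String String), ids.Nodup →
      (∀ id ∈ ids, d.contains id = false) →
      (ids.foldl (fun d book_id =>
        match bd.get? book_id with
        | some v => d.insert book_id v
        | none => d) d).items
        = d.items ++ ids.filterMap (fun id => (bd.get? id).map (fun v => (id, v))) := by
  intro ids
  induction ids with
  | nil => intro d _ _; simp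
  | cons id ids ih =>
    intro d hnd hfresh
    rw [List.foldl_cons, List.filterMap_cons]
    cases hg : bd.get? id with
    | none =>
      simp only [Option.map_none]
      exact ih d hnd.of_cons (fun x hx => hfresh x (List.mem_cons_of_mem _ hx))
    | some v =>
      simp only [Option.map_some]
      rw [ih (d.insert id v) hnd.of_cons ?_]
      · rw [PySem.Dict.items_insert_of_not_contains d v (hfresh id List.mem_cons_self)]
        simp
      · intro x hx
        rw [PySem.Dict.contains_insert]
        have hne : x ≠ id := fun he => (List.nodup_cons.mp hnd).1 (he ▸ hx)
        simp [hne, hfresh x (List.mem_cons_of_mem _ hx)]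

-- the second loop of A
theorem foldl_unknown_items (bd : PySem.Dict String String) :
    ∀ (ks : List String) (d : PySem.Dict String String), ks.Nodup →
      (∀ k ∈ ks, (bd.get? k).isSome) →
      (∀ k ∈ ks, d.contains k = decide (k ∈ BOOK_ORDER)) →
      (ks.foldl (fun d book_id =>
        if d.contains book_id then d
        else match bd.get? book_id with
          | some v => d.insert book_id v
          | none => d) d).items
        = d.items ++ ks.filterMap (fun k =>
            if k ∈ BOOK_ORDER then none else (bd.get? k).map (fun v => (k, v))) := by
  intro ks
  induction ks with
  | nil => intro d _ _ _; simp
  | cons k ks ih =>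
    intro d hnd hsome hinv
    rw [List.foldl_cons, List.filterMap_cons]
    by_cases hmem : k ∈ BOOK_ORDER
    · simp only [hinv k List.mem_cons_self, hmem, decide_true, if_true]
      rw [ih d hnd.of_cons (fun x hx => hsome x (List.mem_cons_of_mem _ hx))
        (fun x hx => hinv x (List.mem_cons_of_mem _ hx))]
    · have hc : d.contains k = false := by
        rw [hinv k List.mem_cons_self]; simpa using hmem
      obtain ⟨v, hv⟩ := Option.isSome_iff_exists.mp (hsome k List.mem_cons_self)
      rw [hc]
      simp only [Bool.false_eq_true, if_false]
      rw [hv]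
      simp only [hmem, if_false]
      rw [ih (d.insert k v) hnd.of_cons (fun x hx => hsome x (List.mem_cons_of_mem _ hx)) ?_]
      · rw [PySem.Dict.items_insert_of_not_contains d v hc]
        simp
      · intro x hx
        rw [PySem.Dict.contains_insert]
        have hne : x ≠ k := fun he => (List.nodup_cons.mp hnd).1 (he ▸ hx)
        simp [hne, hinv x (List.mem_cons_of_mem _ hx)]

-- the bucket loop of B, as a closed form
theorem foldl_buckets (R : (String × String) → Nat) :
    ∀ (l : List (String × String)) (bs : List (List (String × String))),
      (∀ x ∈ l, R x < bs.length) →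
      l.foldl (fun bs kv => bs.set (R kv) (bs.getD (R kv) [] ++ [kv])) bs
        = (List.range bs.length).map (fun i => bs.getD i [] ++ l.filter (fun x => R x == i)) := by
  intro l
  induction l with
  | nil =>
    intro bs _
    apply List.ext_getElem
    · simp
    · intro i h1 h2
      simp at h1 ⊢
      simp [List.getElem?_eq_getElem h1]
  | cons x l ih =>
    intro bs hb
    rw [List.foldl_cons]
    have hR : R x < bs.length := hb x List.mem_cons_self
    rw [ih _ (by intro y hy; rw [List.length_set]; exact hb y (List.mem_cons_of_mem _ hy))]
    rw [List.length_set]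
    apply List.map_congr_left
    intro i hi
    rw [List.mem_range] at hi
    have hiset : i < (bs.set (R x) (bs.getD (R x) [] ++ [x])).length := by simpa using hi
    rw [List.getD_eq_getElem?_getD, List.getElem?_eq_getElem hiset, List.getElem_set]
    by_cases he : R x = i
    · subst he
      rw [if_pos rfl, List.filter_cons]
      simp only [beq_self_eq_true, if_true]
      rw [List.getD_eq_getElem?_getD, List.getElem?_eq_getElem hR]
      simp
    · rw [if_neg he, List.filter_cons]
      have hb : (R x == i) = false := by simpa using he
      rw [hb]
      simp [List.getElem?_eq_getElem hi]

-- per-key filter of a nodup-key association list is its dict lookup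
theorem filter_eq_lookup : ∀ (books : List (String × String)) (id : String),
    (books.map Prod.fst).Nodup →
    books.filter (fun kv => kv.1 == id)
      = ((PySem.Dict.mk books).get? id).elim [] (fun v => [(id, v)]) := by
  intro books
  induction books with
  | nil => intro id _; simp [PySem.Dict.get?]
  | cons kv rest ih =>
    intro id hnd
    obtain ⟨k0, v0⟩ := kv
    rw [List.filter_cons, PySem.Dict.get?_mk_cons]
    by_cases he : k0 = id
    · subst he
      simp only [beq_self_eq_true, if_true, Option.elim]
      have hnd' : (k0 :: rest.map Prod.fst).Nodup := by simpa using hnd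
      have hnil : rest.filter (fun kv => kv.1 == k0) = [] := by
        rw [List.filter_eq_nil_iff]
        intro kv hkv
        have : kv.1 ∈ rest.map Prod.fst := List.mem_map_of_mem hkv
        have h0 : k0 ∉ rest.map Prod.fst := (List.nodup_cons.mp hnd').1
        simp only [beq_iff_eq]
        exact fun hc => h0 (hc ▸ this)
      simp [hnil]
    · have : (k0 == id) = false := by simpa using he
      rw [this]
      simp only [Bool.false_eq_true, if_false]
      exact ih id (by simpa using (List.nodup_cons.mp (by simpa using hnd)).2)

theorem get?_of_mem (books : List (String × String)) (h : (books.map Prod.fst).Nodup) :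
    ∀ kv ∈ books, (PySem.Dict.mk books).get? kv.1 = some kv.2 := by
  induction books with
  | nil => intro kv hkv; simp at hkv
  | cons p rest ih =>
    intro kv hkv
    obtain ⟨k0, v0⟩ := p
    rw [PySem.Dict.get?_mk_cons]
    rcases List.mem_cons.mp hkv with rfl | hmem
    · simp
    · have hne : (k0 == kv.1) = false := by
        have h0 : k0 ∉ rest.map Prod.fst := (List.nodup_cons.mp (by simpa using h)).1
        have : kv.1 ∈ rest.map Prod.fst := List.mem_map_of_mem hmem
        simp only [beq_eq_false_iff_ne, ne_eq]
        exact fun hc => h0 (hc ▸ this)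
      rw [hne]
      simp only [Bool.false_eq_true, if_false]
      exact ih (by simpa using (List.nodup_cons.mp (by simpa using h)).2) kv hmem

theorem map_fst_filterMap (h : String → Option String) (l : List String) :
    (l.filterMap (fun id => (h id).map (fun v => (id, v)))).map Prod.fst
      = l.filter (fun id => (h id).isSome) := by
  induction l with
  | nil => rfl
  | cons x l ih =>
    rw [List.filterMap_cons, List.filter_cons]
    cases hx : h x <;> simp [ih]

theorem p2_eq (e : PySem.Dict String String) :
    ∀ (bs : List (String × String)), (∀ kv ∈ bs, e.get? kv.1 = some kv.2) →
    (bs.map Prod.fst).filterMap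
        (fun k => if k ∈ BOOK_ORDER then none else (e.get? k).map (fun v => (k, v)))
      = bs.filter (fun kv => decide (kv.1 ∉ BOOK_ORDER)) := by
  intro bs
  induction bs with
  | nil => intro _; rfl
  | cons kv bs ih =>
    intro hmem
    rw [List.map_cons, List.filterMap_cons, List.filter_cons]
    by_cases h : kv.1 ∈ BOOK_ORDER
    · simp [h, ih (fun x hx => hmem x (List.mem_cons_of_mem _ hx))]
    · simp [h, hmem kv List.mem_cons_self,
        ih (fun x hx => hmem x (List.mem_cons_of_mem _ hx))]

theorem range_map_getD {α β : Type} (l : List α) (d : α) (G : α → β) :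
    (List.range l.length).map (fun i => G (l.getD i d)) = l.map G := by
  apply List.ext_getElem
  · simp
  · intro i h1 h2
    simp only [List.getElem_map, List.getElem_range]
    rw [List.getD_eq_getElem?_getD, List.getElem?_eq_getElem (by simpa using h1)]
    simp

theorem flatten_filter_eq_filterMap (books : List (String × String))
    (hnd : (books.map Prod.fst).Nodup) :
    ∀ (l : List String),
      (l.map (fun id => books.filter (fun kv => kv.1 == id))).flatten
        = l.filterMap (fun id => ((PySem.Dict.mk books).get? id).map (fun v => (id, v))) := by
  intro l
  induction l with
  | nil => rfl
  | cons id l ih =>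
    rw [List.map_cons, List.filterMap_cons, List.flatten_cons,
      filter_eq_lookup books id hnd, ih]
    cases (PySem.Dict.mk books).get? id <;> simp

theorem keys_nodup_parts (books : List (String × String))
    (hPre : (books.map Prod.fst).Nodup) :
    ((BOOK_ORDER.filterMap (fun id => ((PySem.Dict.mk books).get? id).map (fun v => (id, v)))
        ++ books.filter (fun kv => decide (kv.1 ∉ BOOK_ORDER))).map Prod.fst).Nodup := by
  rw [List.map_append, map_fst_filterMap]
  apply List.Nodup.append
  · exact book_order_nodup.filter _
  · exact hPre.sublist ((List.filter_sublist (l := books)).map Prod.fst)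
  · intro a ha hb
    have h1 : a ∈ BOOK_ORDER := (List.mem_filter.mp ha).1
    obtain ⟨kv, hkv, rfl⟩ := List.mem_map.mp hb
    have := (List.mem_filter.mp hkv).2
    simp at this
    exact this h1

theorem order_books_eq_parts (books : List (String × String))
    (hPre : (books.map Prod.fst).Nodup) :
    order_books books
      = BOOK_ORDER.filterMap (fun id => ((PySem.Dict.mk books).get? id).map (fun v => (id, v)))
        ++ books.filter (fun kv => decide (kv.1 ∉ BOOK_ORDER)) := by
  unfold order_books
  have h1 : (BOOK_ORDER.foldl (fun d book_id =>
      match (PySem.Dict.mk books).get? book_id with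
      | some v => d.insert book_id v
      | none => d) PySem.Dict.empty).items
      = BOOK_ORDER.filterMap (fun id => ((PySem.Dict.mk books).get? id).map (fun v => (id, v))) := by
    simpa using foldl_known_items (PySem.Dict.mk books) BOOK_ORDER PySem.Dict.empty
      book_order_nodup (fun id _ => PySem.Dict.contains_empty id)
  have hkeys1 : (BOOK_ORDER.foldl (fun d book_id =>
      match (PySem.Dict.mk books).get? book_id with
      | some v => d.insert book_id v
      | none => d) PySem.Dict.empty).keys
      = BOOK_ORDER.filter (fun id => ((PySem.Dict.mk books).get? id).isSome) := by
    show List.map Prod.fst _ = _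
    rw [h1, map_fst_filterMap]
  have hsome : ∀ k ∈ (PySem.Dict.mk books).keys, ((PySem.Dict.mk books).get? k).isSome := by
    intro k hk
    rcases hx : (PySem.Dict.mk books).get? k with _ | v
    · exact absurd hk ((PySem.Dict.get?_eq_none_iff_not_mem_keys _ k).mp hx)
    · rfl
  have hinv : ∀ k ∈ (PySem.Dict.mk books).keys, (BOOK_ORDER.foldl (fun d book_id =>
      match (PySem.Dict.mk books).get? book_id with
      | some v => d.insert book_id v
      | none => d) PySem.Dict.empty).contains k = decide (k ∈ BOOK_ORDER) := by
    intro k hk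
    rw [PySem.Dict.contains_eq_decide_mem_keys, hkeys1]
    simp [List.mem_filter, hsome k hk]
  have hknd : (PySem.Dict.mk books).keys.Nodup := by rw [PySem.Dict.keys_mk]; exact hPre
  rw [foldl_unknown_items (PySem.Dict.mk books) _ _ hknd hsome hinv, h1,
    PySem.Dict.keys_mk, p2_eq _ books (get?_of_mem books hPre)]

theorem order_books_alt_eq_parts (books : List (String × String))
    (hPre : (books.map Prod.fst).Nodup) :
    order_books_alt books
      = BOOK_ORDER.filterMap (fun id => ((PySem.Dict.mk books).get? id).map (fun v => (id, v)))
        ++ books.filter (fun kv => decide (kv.1 ∉ BOOK_ORDER)) := by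
  have hBdef : order_books_alt books
      = ((books.foldl (fun bs kv =>
            bs.set (pvRank kv.1) (bs.getD (pvRank kv.1) [] ++ [kv]))
          (List.replicate (BOOK_ORDER.length + 1) [])).flatten.foldl
          (fun (d : PySem.Dict String String) kv => d.insert kv.1 kv.2)
          PySem.Dict.empty).items := by
    unfold order_books_alt
    rw [CANON_eq]
    rfl
  have hL : (books.foldl (fun bs kv =>
        bs.set (pvRank kv.1) (bs.getD (pvRank kv.1) [] ++ [kv]))
      (List.replicate (BOOK_ORDER.length + 1) [])).flatten
      = BOOK_ORDER.filterMap (fun id => ((PySem.Dict.mk books).get? id).map (fun v => (id, v)))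
        ++ books.filter (fun kv => decide (kv.1 ∉ BOOK_ORDER)) := by
    rw [foldl_buckets (fun kv => pvRank kv.1) books _
      (fun x _ => by rw [List.length_replicate]; exact rank_lt x.1)]
    have hmap : (List.range (List.replicate (BOOK_ORDER.length + 1)
          ([] : List (String × String))).length).map
          (fun i => (List.replicate (BOOK_ORDER.length + 1) []).getD i []
            ++ books.filter (fun x => pvRank x.1 == i))
        = (List.range (BOOK_ORDER.length + 1)).map
          (fun i => books.filter (fun x => pvRank x.1 == i)) := by
      rw [List.length_replicate]
      apply List.map_congr_left
      intro i hi
      rw [List.mem_range] at hi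
      rw [List.getD_replicate _ hi]
      rfl
    rw [hmap, List.range_succ, List.map_append, List.flatten_append]
    congr 1
    · have hfront : (List.range BOOK_ORDER.length).map
          (fun i => books.filter (fun x => pvRank x.1 == i))
          = (List.range BOOK_ORDER.length).map
            (fun i => books.filter (fun kv => kv.1 == BOOK_ORDER.getD i "")) := by
        apply List.map_congr_left
        intro i hi
        rw [List.mem_range] at hi
        apply List.filter_congr
        intro x _
        rw [List.getD_eq_getElem?_getD, List.getElem?_eq_getElem hi]
        simp only [Option.getD_some]
        rw [Bool.eq_iff_iff, beq_iff_eq, beq_iff_eq]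
        exact rank_eq_iff hi
      rw [hfront]
      have hr := range_map_getD BOOK_ORDER ""
        (fun id => books.filter (fun kv => kv.1 == id))
      rw [hr, flatten_filter_eq_filterMap books hPre]
    · simp only [List.map_cons, List.map_nil, List.flatten_cons, List.flatten_nil,
        List.append_nil]
      apply List.filter_congr
      intro x _
      rw [Bool.eq_iff_iff, beq_iff_eq, decide_eq_true_iff]
      exact rank_eq_len_iff
  rw [hBdef, hL]
  have hfoldl := PySem.Dict.items_foldl_insert_fresh
    (BOOK_ORDER.filterMap (fun id => ((PySem.Dict.mk books).get? id).map (fun v => (id, v)))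
      ++ books.filter (fun kv => decide (kv.1 ∉ BOOK_ORDER)))
    Prod.fst Prod.snd PySem.Dict.empty
    (fun a _ => PySem.Dict.contains_empty a.1)
    (keys_nodup_parts books hPre)
  simpa using hfoldl

-- ===== VERDICT (by name: the statement is the Claim_ definition above) =====
theorem order_books_spec : Claim_equal_order_books := by
  intro books _ hPre
  show order_books books = order_books_alt books
  rw [order_books_eq_parts books hPre, order_books_alt_eq_parts books hPre]
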